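-- pv_equiv track=rewrite | github.com/ericpts/NLP | embeddings.py | __map_extra_symbols
-- ===== SOURCE A (Python) =====
-- def __map_extra_symbols(text : str) -> str:
--     emoji_dictionary = {
--         'exclamation': [i * '!' for i in range(1, 11, 1)],
--         'pause': [i * '.' for i in range(1,  11, 1)],
--         'question': [i * '?' for i in range(1, 11, 1)],
--     }
--     for meaning in emoji_dictionary.keys():
--         for (i, emoji) in enumerate(emoji_dictionary[meaning]):
--             spaced_emoji = ' '.join(list(emoji))
--             text = text.replace(emoji, ' {} '.format(meaning))
--             text = text.replace(spaced_emoji, ' {} '.format(meaning))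
--     return text
-- ===== SOURCE B (Python) =====
-- def __map_extra_symbols(text : str) -> str:
--     table = str.maketrans({'!': ' exclamation ', '.': ' pause ', '?': ' question '})
--     return text.translate(table)
-- ===== Notes on version B (the rewrite author's own statement) =====
-- stated objective: faster
-- what changed: B replaces A's 60 sequential full-text replace passes (three meanings x ten run lengths x plain+spaced forms) with a single per-character translation pass (str.translate with a three-entry table), valid because runs reduce to per-character replacement and the replacement words contain no special characters.
import Mathlib
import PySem

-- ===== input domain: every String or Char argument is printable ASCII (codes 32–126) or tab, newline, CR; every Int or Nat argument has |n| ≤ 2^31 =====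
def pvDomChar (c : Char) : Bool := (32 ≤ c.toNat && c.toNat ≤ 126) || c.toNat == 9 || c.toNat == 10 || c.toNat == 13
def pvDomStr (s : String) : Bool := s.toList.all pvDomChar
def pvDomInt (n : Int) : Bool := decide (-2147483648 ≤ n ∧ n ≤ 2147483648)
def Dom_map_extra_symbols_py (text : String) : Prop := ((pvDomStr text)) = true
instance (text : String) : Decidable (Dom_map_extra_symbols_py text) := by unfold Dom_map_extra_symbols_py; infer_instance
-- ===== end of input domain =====

-- B replaces A's 60 sequential full-text replace passes with one per-character
-- translation pass (str.translate); idiomatic, same results.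


-- ===== PORT A =====
def map_extra_symbols_py (text : String) : String :=
  let emoji_dictionary : PySem.Dict (List Char) (List (List Char)) :=
    ((PySem.Dict.empty.insert ("exclamation".toList)
        ((PySem.List.pyRange 1 11 1).map (fun i => PySem.List.pyRepeat ['!'] i))).insert
      ("pause".toList)
        ((PySem.List.pyRange 1 11 1).map (fun i => PySem.List.pyRepeat ['.'] i))).insert
      ("question".toList)
        ((PySem.List.pyRange 1 11 1).map (fun i => PySem.List.pyRepeat ['?'] i))
  let out :=
    (PySem.Dict.keys emoji_dictionary).foldl (fun t meaning =>
      (PySem.List.enumerate ((PySem.Dict.get? emoji_dictionary meaning).getD []) 0).foldl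
        (fun t pr =>
          let emoji := pr.2
          let spaced_emoji := PySem.Chars.join [' '] (emoji.map (fun c => [c]))
          let t := PySem.Chars.replace t emoji ([' '] ++ meaning ++ [' '])
          PySem.Chars.replace t spaced_emoji ([' '] ++ meaning ++ [' '])) t)
      text.toList
  String.mk out

-- ===== PORT B =====
def map_extra_symbols_py_alt (text : String) : String :=
  String.mk (text.toList.flatMap (fun c =>
    if c = '!' then " exclamation ".toList
    else if c = '.' then " pause ".toList
    else if c = '?' then " question ".toList
    else [c]))

-- ===== PRECONDITION & SPEC =====
def Spec_map_extra_symbols_py (text : String) (out : String) : Prop := out = map_extra_symbols_py_alt text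
instance (text : String) (out : String) : Decidable (Spec_map_extra_symbols_py text out) := by unfold Spec_map_extra_symbols_py; infer_instance

-- ===== CLAIM (what is proved, stated in full; the proofs are below) =====
def Claim_equal_map_extra_symbols_py : Prop := ∀ (text : String), Dom_map_extra_symbols_py text → Spec_map_extra_symbols_py text (map_extra_symbols_py text)

-- ===== LEMMAS AND PROOFS =====

-- one replacement pass: every occurrence of the single character c becomes w
def pvPass (c : Char) (w : List Char) (s : List Char) : List Char :=
  s.flatMap (fun x => if x = c then w else [x])

-- the inner loop of A for one meaning (patterns are runs of c of lengths 1..10)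
def pvInner (c : Char) (meaning : List Char) (t : List Char) : List Char :=
  (PySem.List.enumerate ((PySem.List.pyRange 1 11 1).map (fun i => PySem.List.pyRepeat [c] i)) 0).foldl
    (fun t pr =>
      PySem.Chars.replace
        (PySem.Chars.replace t pr.2 ([' '] ++ meaning ++ [' ']))
        (PySem.Chars.join [' '] (pr.2.map (fun c => [c])))
        ([' '] ++ meaning ++ [' '])) t

def pvDict : PySem.Dict (List Char) (List (List Char)) :=
  ((PySem.Dict.empty.insert ("exclamation".toList)
      ((PySem.List.pyRange 1 11 1).map (fun i => PySem.List.pyRepeat ['!'] i))).insert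
    ("pause".toList)
      ((PySem.List.pyRange 1 11 1).map (fun i => PySem.List.pyRepeat ['.'] i))).insert
    ("question".toList)
      ((PySem.List.pyRange 1 11 1).map (fun i => PySem.List.pyRepeat ['?'] i))

set_option maxRecDepth 4000 in
lemma pvA_unfold (text : String) :
    map_extra_symbols_py text =
      String.mk (pvInner '?' "question".toList
        (pvInner '.' "pause".toList
          (pvInner '!' "exclamation".toList text.toList))) := by
  show String.mk ((PySem.Dict.keys pvDict).foldl (fun t meaning =>
      (PySem.List.enumerate ((PySem.Dict.get? pvDict meaning).getD []) 0).foldl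
        (fun t pr =>
          PySem.Chars.replace
            (PySem.Chars.replace t pr.2 ([' '] ++ meaning ++ [' ']))
            (PySem.Chars.join [' '] (pr.2.map (fun c => [c])))
            ([' '] ++ meaning ++ [' '])) t)
      text.toList) = _
  rw [(by decide : PySem.Dict.keys pvDict =
        ["exclamation".toList, "pause".toList, "question".toList])]
  simp only [List.foldl_cons, List.foldl_nil]
  rw [(by decide : (PySem.Dict.get? pvDict "exclamation".toList).getD [] =
        (PySem.List.pyRange 1 11 1).map (fun i => PySem.List.pyRepeat ['!'] i)),
      (by decide : (PySem.Dict.get? pvDict "pause".toList).getD [] =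
        (PySem.List.pyRange 1 11 1).map (fun i => PySem.List.pyRepeat ['.'] i)),
      (by decide : (PySem.Dict.get? pvDict "question".toList).getD [] =
        (PySem.List.pyRange 1 11 1).map (fun i => PySem.List.pyRepeat ['?'] i))]
  rfl

lemma pv_go_single (c : Char) (w : List Char) :
    ∀ (s acc : List Char),
      PySem.Chars.replace.go [c] w s.length s acc =
        acc.reverse ++ s.flatMap (fun x => if x = c then w else [x]) := by
  intro s
  induction s with
  | nil => intro acc; simp [PySem.Chars.replace.go]
  | cons a t ih =>
      intro acc
      show PySem.Chars.replace.go [c] w (t.length + 1) (a :: t) acc = _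
      by_cases h : a = c
      · subst h
        have hpre : [a].isPrefixOf (a :: t) = true := by
          simp [List.isPrefixOf]
        simp only [PySem.Chars.replace.go, hpre, if_true]
        rw [show List.drop [a].length (a :: t) = t from rfl, ih]
        simp
      · have hpre : [c].isPrefixOf (a :: t) = false := by
          simp [List.isPrefixOf]
          intro hc; exact h hc.symm
        simp only [PySem.Chars.replace.go, hpre]
        rw [if_neg (by simp), ih]
        simp [h]

lemma pv_replace_single (c : Char) (w s : List Char) :
    PySem.Chars.replace s [c] w = pvPass c w s := by
  simp only [PySem.Chars.replace, List.isEmpty, pvPass]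
  exact pv_go_single c w s []

lemma pv_go_id (old new : List Char) :
    ∀ (fuel : Nat) (s acc : List Char), ¬ old <:+: s →
      PySem.Chars.replace.go old new fuel s acc = acc.reverse ++ s := by
  intro fuel
  induction fuel with
  | zero => intro s acc _; simp [PySem.Chars.replace.go]
  | succ n ih =>
      intro s acc h
      cases s with
      | nil => simp [PySem.Chars.replace.go]
      | cons a t =>
          have hpre : old.isPrefixOf (a :: t) = false := by
            by_contra hc
            have : old.isPrefixOf (a :: t) = true := by
              cases hx : old.isPrefixOf (a :: t) <;> simp_all
            exact h (List.isPrefixOf_iff_prefix.mp this).isInfix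
          have ht : ¬ old <:+: t := by
            intro hinf
            exact h (hinf.trans (List.suffix_cons a t).isInfix)
          simp only [PySem.Chars.replace.go, hpre]
          rw [if_neg (by simp), ih t (a :: acc) ht]
          simp

lemma pv_replace_id (old new s : List Char) (hne : old ≠ []) (h : ¬ old <:+: s) :
    PySem.Chars.replace s old new = s := by
  simp only [PySem.Chars.replace, List.isEmpty_iff, hne, if_false]
  simpa using pv_go_id old new s.length s [] h

lemma pv_not_infix (c : Char) (old s : List Char) (hm : c ∈ old) (hs : c ∉ s) :
    ¬ old <:+: s := fun h => hs (h.subset hm)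

lemma pv_pass_not_mem (c : Char) (w s : List Char) (hw : c ∉ w) : c ∉ pvPass c w s := by
  intro h
  simp only [pvPass, List.mem_flatMap] at h
  obtain ⟨x, _, hx⟩ := h
  by_cases hxc : x = c
  · rw [if_pos hxc] at hx; exact hw hx
  · rw [if_neg hxc] at hx; simp at hx; exact hxc (hx ▸ rfl)

lemma pv_mem_join (c : Char) : ∀ (pat : List Char), c ∈ pat →
    c ∈ PySem.Chars.join [' '] (pat.map (fun x => [x])) := by
  intro pat
  induction pat with
  | nil => simp
  | cons a rest ih =>
      intro h
      cases rest with
      | nil =>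
          simp at h
          simp [PySem.Chars.join_singleton, h]
      | cons b r =>
          rw [List.map_cons, List.map_cons, PySem.Chars.join_cons_cons]
          rcases List.mem_cons.mp h with h | h
          · simp [h]
          · simp only [List.mem_append]
            right
            show c ∈ PySem.Chars.join [' '] (List.map (fun x => [x]) (b :: r))
            exact ih h

lemma pv_step_id (c : Char) (pat meaning t : List Char) (hp : c ∈ pat) (hc : c ∉ t) :
    PySem.Chars.replace
      (PySem.Chars.replace t pat ([' '] ++ meaning ++ [' ']))
      (PySem.Chars.join [' '] (pat.map (fun x => [x])))
      ([' '] ++ meaning ++ [' ']) = t := by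
  have hne : pat ≠ [] := by rintro rfl; simp at hp
  rw [pv_replace_id pat _ t hne (pv_not_infix c pat t hp hc)]
  have hj := pv_mem_join c pat hp
  have hjne : PySem.Chars.join [' '] (pat.map (fun x => [x])) ≠ [] := by
    rintro h; rw [h] at hj; simp at hj
  exact pv_replace_id _ _ t hjne (pv_not_infix c _ t hj hc)

lemma pv_fold_id (c : Char) (meaning : List Char) :
    ∀ (ps : List (Int × List Char)) (t : List Char), (∀ pr ∈ ps, c ∈ pr.2) → c ∉ t →
      ps.foldl (fun t pr =>
        PySem.Chars.replace
          (PySem.Chars.replace t pr.2 ([' '] ++ meaning ++ [' ']))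
          (PySem.Chars.join [' '] (pr.2.map (fun c => [c])))
          ([' '] ++ meaning ++ [' '])) t = t := by
  intro ps
  induction ps with
  | nil => intro t _ _; rfl
  | cons p rest ih =>
      intro t hps hc
      simp only [List.foldl_cons]
      rw [pv_step_id c p.2 meaning t (hps p (List.mem_cons_self)) hc]
      exact ih t (fun pr hpr => hps pr (List.mem_cons_of_mem p hpr)) hc

lemma pv_inner_eq_pass (c : Char) (meaning t : List Char)
    (hw : c ∉ [' '] ++ meaning ++ [' ']) :
    pvInner c meaning t = pvPass c ([' '] ++ meaning ++ [' ']) t := by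
  have henum : PySem.List.enumerate
      ((PySem.List.pyRange 1 11 1).map (fun i => PySem.List.pyRepeat [c] i)) 0 =
      (0, [c]) :: [(1,[c,c]),(2,[c,c,c]),(3,[c,c,c,c]),(4,[c,c,c,c,c]),(5,[c,c,c,c,c,c]),
        (6,[c,c,c,c,c,c,c]),(7,[c,c,c,c,c,c,c,c]),(8,[c,c,c,c,c,c,c,c,c]),
        (9,[c,c,c,c,c,c,c,c,c,c])] := rfl
  have h1 : pvInner c meaning t =
      [((1:Int),[c,c]),(2,[c,c,c]),(3,[c,c,c,c]),(4,[c,c,c,c,c]),(5,[c,c,c,c,c,c]),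
        (6,[c,c,c,c,c,c,c]),(7,[c,c,c,c,c,c,c,c]),(8,[c,c,c,c,c,c,c,c,c]),
        (9,[c,c,c,c,c,c,c,c,c,c])].foldl
        (fun t pr =>
          PySem.Chars.replace
            (PySem.Chars.replace t pr.2 ([' '] ++ meaning ++ [' ']))
            (PySem.Chars.join [' '] (pr.2.map (fun x => [x])))
            ([' '] ++ meaning ++ [' ']))
        (pvPass c ([' '] ++ meaning ++ [' ']) t) := by
    unfold pvInner
    rw [henum, List.foldl_cons]
    congr 1
    show PySem.Chars.replace
        (PySem.Chars.replace t [c] ([' '] ++ meaning ++ [' ']))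
        (PySem.Chars.join [' '] [[c]]) ([' '] ++ meaning ++ [' ']) = _
    rw [pv_replace_single, PySem.Chars.join_singleton]
    exact pv_replace_id [c] _ _ (by simp)
      (pv_not_infix c [c] _ (by simp) (pv_pass_not_mem c _ t hw))
  rw [h1]
  exact pv_fold_id c meaning _ _ (by simp) (pv_pass_not_mem c _ t hw)

lemma pv_final (s : List Char) :
    pvPass '?' ([' '] ++ "question".toList ++ [' '])
      (pvPass '.' ([' '] ++ "pause".toList ++ [' '])
        (pvPass '!' ([' '] ++ "exclamation".toList ++ [' ']) s)) =
    s.flatMap (fun c =>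
      if c = '!' then " exclamation ".toList
      else if c = '.' then " pause ".toList
      else if c = '?' then " question ".toList
      else [c]) := by
  induction s with
  | nil => rfl
  | cons a t ih =>
      simp only [pvPass, List.flatMap_cons, List.flatMap_append] at *
      rw [ih]
      congr 1
      by_cases h1 : a = '!'
      · subst h1; decide
      · by_cases h2 : a = '.'
        · subst h2; decide
        · by_cases h3 : a = '?'
          · subst h3; decide
          · simp [h1, h2, h3]

-- ===== VERDICT (by name: the statement is the Claim_ definition above) =====
theorem map_extra_symbols_py_spec : Claim_equal_map_extra_symbols_py := by
  intro text _
  show map_extra_symbols_py text = map_extra_symbols_py_alt text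
  rw [pvA_unfold, map_extra_symbols_py_alt]
  rw [pv_inner_eq_pass '!' _ _ (by decide), pv_inner_eq_pass '.' _ _ (by decide),
      pv_inner_eq_pass '?' _ _ (by decide), pv_final]
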